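-- pv_equiv track=rewrite | github.com/dhanushk-offl/hallx | hallx/retry.py | _schema_related_issue
-- ===== SOURCE A (Python) =====
-- from typing import Any, Dict, List, Mapping
--
-- def _schema_related_issue(issues: List[str]) -> bool:
--     markers = (
--         "missing field",
--         "wrong type",
--         "enum violation",
--         "unexpected extra field",
--         "null injection",
--     )
--     lowered = [issue.lower() for issue in issues]
--     return any(marker in issue for issue in lowered for marker in markers)
-- ===== SOURCE B (Python) =====
-- from typing import List
--
-- _MARKERS = (
--     "missing field",
--     "wrong type",
--     "enum violation",
--     "unexpected extra field",
--     "null injection",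
-- )
--
--
-- def _schema_related_issue(issues: List[str]) -> bool:
--     # Multi-pattern NFA scan: stream each issue one character at a time
--     # (lowercasing on the fly), maintaining the set of marker prefixes
--     # matched so far; a marker is reported the moment its final character
--     # arrives.  No substring-membership primitive is used.
--     for issue in issues:
--         states = []  # (marker, number of marker chars matched so far)
--         for ch in issue:
--             c = ch.lower()
--             advanced = []
--             for m, k in states:
--                 if m[k] == c:
--                     if k + 1 == len(m):
--                         return True
--                     advanced.append((m, k + 1))
--             for m in _MARKERS:
--                 if m[0] == c:
--                     advanced.append((m, 1))
--             states = advanced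
--     return False
-- ===== Notes on version B (the rewrite author's own statement) =====
-- stated objective: alternative
-- what changed: B replaces A's lowercase-then-nested-substring-membership loops with a streaming multi-pattern NFA: each issue is scanned character by character (lowercased on the fly) while a set of partially matched marker prefixes is maintained, reporting a marker the moment its last character arrives.
import Mathlib
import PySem

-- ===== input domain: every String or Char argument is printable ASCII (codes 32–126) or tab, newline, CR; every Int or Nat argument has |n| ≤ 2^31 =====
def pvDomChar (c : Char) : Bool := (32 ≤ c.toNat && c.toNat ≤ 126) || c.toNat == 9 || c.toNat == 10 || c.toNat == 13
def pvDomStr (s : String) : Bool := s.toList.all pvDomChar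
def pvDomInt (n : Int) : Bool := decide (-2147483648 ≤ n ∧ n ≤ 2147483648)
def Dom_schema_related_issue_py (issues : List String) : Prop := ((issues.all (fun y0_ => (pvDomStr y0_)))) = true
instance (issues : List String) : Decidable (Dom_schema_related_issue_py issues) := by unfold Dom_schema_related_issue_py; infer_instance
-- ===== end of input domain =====

-- B replaces A's per-issue substring-membership tests by a streaming multi-pattern NFA scan
-- (character by character, lowercased on the fly, maintaining partially matched marker prefixes).

-- ===== PORT A =====
def schema_related_issue_py (issues : List String) : Bool :=
  let markers : List String :=
    ["missing field", "wrong type", "enum violation", "unexpected extra field", "null injection"]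
  let lowered := issues.map PySem.Str.lower
  lowered.any fun issue => markers.any fun marker => PySem.Str.isIn marker issue

-- ===== PORT B =====
def pvMarkers : List (List Char) :=
  ["missing field".toList, "wrong type".toList, "enum violation".toList,
   "unexpected extra field".toList, "null injection".toList]

-- the inner `for m, k in states` loop: advance each partial match by `c`;
-- `none` = some marker just completed (python's early `return True`)
def pvAdvance : List (List Char × Nat) → Char → Option (List (List Char × Nat))
  | [], _ => some []
  | (m, k) :: rest, c =>
    if m.getD k ' ' = c then
      if k + 1 = m.length then none
      else (pvAdvance rest c).map (fun l => (m, k + 1) :: l)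
    else pvAdvance rest c

-- the `for m in _MARKERS` loop: start a new partial match at `c`
def pvStarts (c : Char) : List (List Char × Nat) :=
  pvMarkers.filterMap (fun m => if m.getD 0 ' ' = c then some (m, 1) else none)

def pvStep (states : List (List Char × Nat)) (c : Char) : Option (List (List Char × Nat)) :=
  (pvAdvance states c).map (fun l => l ++ pvStarts c)

-- the `for ch in issue` loop; `isNone` = the early return fired
def pvScan (cs : List Char) : Bool :=
  (cs.foldl (fun st c => st.bind (fun s => pvStep s (PySem.Chars.lowerChar c))) (some [])).isNone

def schema_related_issue_py_alt (issues : List String) : Bool :=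
  issues.any fun issue => pvScan issue.toList

-- ===== PRECONDITION & SPEC =====
def Spec_schema_related_issue_py (issues : List String) (out : Bool) : Prop := out = schema_related_issue_py_alt issues
instance (issues : List String) (out : Bool) : Decidable (Spec_schema_related_issue_py issues out) := by unfold Spec_schema_related_issue_py; infer_instance

-- ===== CLAIM (what is proved, stated in full; the proofs are below) =====
def Claim_equal_schema_related_issue_py : Prop := ∀ (issues : List String), Dom_schema_related_issue_py issues → Spec_schema_related_issue_py issues (schema_related_issue_py issues)

-- ===== LEMMAS AND PROOFS =====

-- a state (m, k) is valid for processed (lowered) text p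
def pvGood (p : List Char) (e : List Char × Nat) : Prop :=
  e.1 ∈ pvMarkers ∧ 1 ≤ e.2 ∧ e.2 < e.1.length ∧ e.1.take e.2 <:+ p

def pvInv (p : List Char) (states : List (List Char × Nat)) : Prop :=
  ∀ e, e ∈ states ↔ pvGood p e

theorem pv_markers_long : ∀ m ∈ pvMarkers, 2 ≤ m.length := by decide

theorem pv_suffix_concat (m p : List Char) (c : Char) :
    m <:+ p ++ [c] ↔ m = [] ∨ ∃ m', m = m' ++ [c] ∧ m' <:+ p := by
  constructor
  · rintro ⟨t, ht⟩
    rcases m.eq_nil_or_concat with rfl | ⟨m', c', rfl⟩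
    · exact Or.inl rfl
    · right
      simp only [List.concat_eq_append, ← List.append_assoc] at ht ⊢
      obtain ⟨h1, h2⟩ := List.append_inj' ht (by simp)
      simp only [List.cons.injEq, and_true] at h2
      exact ⟨m', by rw [h2], ⟨t, h1⟩⟩
  · rintro (rfl | ⟨m', rfl, ⟨t, ht⟩⟩)
    · exact List.nil_suffix
    · exact ⟨t, by rw [← List.append_assoc, ht]⟩

theorem pv_suffix_snoc (p : List Char) (c : Char) (m' : List Char)
    (h : m' <:+ p) : m' ++ [c] <:+ p ++ [c] := by
  obtain ⟨t, rfl⟩ := h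
  exact ⟨t, by simp⟩

theorem pv_take_concat (m : List Char) (k : Nat) (hk : k < m.length) :
    m.take (k + 1) = m.take k ++ [m.getD k ' '] := by
  rw [List.take_add_one, List.getD]
  congr 1
  simp [List.getElem?_eq_getElem hk]

theorem pv_advance_none (states : List (List Char × Nat)) (c : Char) :
    pvAdvance states c = none ↔
      ∃ e ∈ states, e.1.getD e.2 ' ' = c ∧ e.2 + 1 = e.1.length := by
  induction states with
  | nil => simp [pvAdvance]
  | cons e rest ih =>
    obtain ⟨m, k⟩ := e
    simp only [pvAdvance]
    split_ifs with h1 h2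
    · exact iff_of_true rfl ⟨(m, k), List.mem_cons_self, h1, h2⟩
    · rw [Option.map_eq_none_iff, ih]
      constructor
      · rintro ⟨e, he, h⟩; exact ⟨e, List.mem_cons_of_mem _ he, h⟩
      · rintro ⟨e, he, h⟩
        rcases List.mem_cons.mp he with rfl | he'
        · exact absurd h.2 h2
        · exact ⟨e, he', h⟩
    · rw [ih]
      constructor
      · rintro ⟨e, he, h⟩; exact ⟨e, List.mem_cons_of_mem _ he, h⟩
      · rintro ⟨e, he, h⟩
        rcases List.mem_cons.mp he with rfl | he'
        · exact absurd h.1 h1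
        · exact ⟨e, he', h⟩

theorem pv_advance_some (states : List (List Char × Nat)) (c : Char)
    (l : List (List Char × Nat)) (h : pvAdvance states c = some l) :
    ∀ m k', (m, k') ∈ l ↔
      ∃ k, k' = k + 1 ∧ (m, k) ∈ states ∧ m.getD k ' ' = c ∧ k + 1 ≠ m.length := by
  induction states generalizing l with
  | nil =>
    simp only [pvAdvance, Option.some.injEq] at h
    subst h; simp
  | cons e rest ih =>
    obtain ⟨m0, k0⟩ := e
    simp only [pvAdvance] at h
    split_ifs at h with h1 h2
    · rcases hrest : pvAdvance rest c with _ | l'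
      · rw [hrest] at h; simp at h
      · rw [hrest] at h
        simp only [Option.map_some, Option.some.injEq] at h
        subst h
        intro m k'
        constructor
        · intro hmem
          rcases List.mem_cons.mp hmem with heq | hmem'
          · injection heq with e1 e2
            subst e1; subst e2
            exact ⟨k0, rfl, List.mem_cons_self, h1, h2⟩
          · obtain ⟨k, rfl, hk, hc, hne⟩ := (ih l' hrest m k').mp hmem'
            exact ⟨k, rfl, List.mem_cons_of_mem _ hk, hc, hne⟩
        · rintro ⟨k, rfl, hk, hc, hne⟩
          rcases List.mem_cons.mp hk with heq | hk'
          · injection heq with e1 e2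
            subst e1; subst e2
            exact List.mem_cons_self
          · exact List.mem_cons_of_mem _ ((ih l' hrest m (k + 1)).mpr ⟨k, rfl, hk', hc, hne⟩)
    · intro m k'
      rw [ih l h]
      constructor
      · rintro ⟨k, rfl, hk, hc, hne⟩
        exact ⟨k, rfl, List.mem_cons_of_mem _ hk, hc, hne⟩
      · rintro ⟨k, rfl, hk, hc, hne⟩
        rcases List.mem_cons.mp hk with heq | hk'
        · injection heq with e1 e2
          subst e1; subst e2
          exact absurd hc h1
        · exact ⟨k, rfl, hk', hc, hne⟩

theorem pv_starts_mem (c : Char) (m : List Char) (k' : Nat) :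
    (m, k') ∈ pvStarts c ↔ m ∈ pvMarkers ∧ k' = 1 ∧ m.getD 0 ' ' = c := by
  simp only [pvStarts, List.mem_filterMap]
  constructor
  · rintro ⟨a, ha, h⟩
    split_ifs at h with h0
    · simp only [Option.some.injEq, Prod.mk.injEq] at h
      obtain ⟨rfl, rfl⟩ := h
      exact ⟨ha, rfl, h0⟩
  · rintro ⟨hm, rfl, h0⟩
    exact ⟨m, hm, by rw [if_pos h0]⟩

theorem pv_step_none (p : List Char) (states : List (List Char × Nat))
    (hinv : pvInv p states) (c : Char) :
    pvStep states c = none ↔ ∃ m ∈ pvMarkers, m <:+ p ++ [c] := by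
  simp only [pvStep, Option.map_eq_none_iff, pv_advance_none]
  constructor
  · rintro ⟨⟨m, k⟩, he, hc, hlen⟩
    obtain ⟨hm, _, hk, hsuf⟩ := (hinv (m, k)).mp he
    refine ⟨m, hm, ?_⟩
    have h1 : m.take (k + 1) = m.take k ++ [c] := by rw [pv_take_concat m k hk, hc]
    have h2 : m.take (k + 1) = m := by rw [hlen, List.take_length]
    rw [← h2, h1]
    exact pv_suffix_snoc p c _ hsuf
  · rintro ⟨m, hm, hsuf⟩
    have hlen := pv_markers_long m hm
    have hne : m ≠ [] := by intro h; rw [h] at hlen; simp at hlen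
    rcases (pv_suffix_concat m p c).mp hsuf with rfl | ⟨m', rfl, hm'⟩
    · exact absurd rfl hne
    · refine ⟨(m' ++ [c], m'.length), ?_, ?_, by simp⟩
      · apply (hinv _).mpr
        refine ⟨hm, ?_, by simp, ?_⟩
        · simp only [List.length_append, List.length_cons, List.length_nil] at hlen
          omega
        · simpa [List.take_left] using hm'
      · simp [List.getD]

theorem pv_step_some (p : List Char) (states : List (List Char × Nat))
    (hinv : pvInv p states) (c : Char) (l : List (List Char × Nat))
    (h : pvStep states c = some l) : pvInv (p ++ [c]) l := by
  simp only [pvStep] at h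
  rcases hadv : pvAdvance states c with _ | a
  · rw [hadv] at h; simp at h
  · rw [hadv] at h
    simp only [Option.map_some, Option.some.injEq] at h
    subst h
    rintro ⟨m, k'⟩
    simp only [List.mem_append, pv_advance_some states c a hadv, pv_starts_mem]
    unfold pvGood
    dsimp only
    constructor
    · rintro (⟨k, rfl, hk, hc, hne⟩ | ⟨hm, rfl, h0⟩)
      · obtain ⟨hm, hk1, hklt, hsuf⟩ := (hinv (m, k)).mp hk
        have hk1' : 1 ≤ k := hk1
        have hklt' : k < m.length := hklt
        refine ⟨hm, by omega, by omega, ?_⟩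
        rw [pv_take_concat m k hklt, hc]
        exact pv_suffix_snoc p c _ hsuf
      · have hlen := pv_markers_long m hm
        refine ⟨hm, le_refl 1, by omega, ?_⟩
        rw [pv_take_concat m 0 (by omega), h0]
        exact pv_suffix_snoc p c [] (List.nil_suffix)
    · rintro ⟨hm, hk1, hklt, hsuf⟩
      have htake : m.take k' = m.take (k' - 1) ++ [m.getD (k' - 1) ' '] := by
        have := pv_take_concat m (k' - 1) (by omega)
        rwa [Nat.sub_add_cancel hk1] at this
      rw [htake] at hsuf
      rcases (pv_suffix_concat _ p c).mp hsuf with habs | ⟨w, heq, hw⟩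
      · simp at habs
      · obtain ⟨h1, h2⟩ := List.append_inj' heq (by simp)
        simp only [List.cons.injEq, and_true] at h2
        rcases Nat.lt_or_ge 1 k' with hk2 | hk2
        · left
          refine ⟨k' - 1, by omega, ?_, h2, by omega⟩
          apply (hinv _).mpr
          exact ⟨hm, (by omega : 1 ≤ k' - 1), (by omega : k' - 1 < m.length), h1 ▸ hw⟩
        · right
          have hk'1 : k' = 1 := by omega
          subst hk'1
          exact ⟨hm, rfl, h2⟩

theorem pv_run_none (ls : List Char) :
    ls.foldl (fun st c => st.bind (fun s => pvStep s (PySem.Chars.lowerChar c))) none = none := by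
  induction ls with
  | nil => rfl
  | cons c ls ih => simpa using ih

theorem pv_main (ls : List Char) : ∀ (p : List Char) (states : List (List Char × Nat)),
    pvInv p states →
    ((ls.foldl (fun st c => st.bind (fun s => pvStep s (PySem.Chars.lowerChar c))) (some states)) = none ↔
      ∃ m ∈ pvMarkers, ∃ u v, ls = u ++ v ∧ u ≠ [] ∧ m <:+ p ++ u.map PySem.Chars.lowerChar) := by
  induction ls with
  | nil =>
    intro p states _
    simp only [List.foldl_nil]
    constructor
    · intro h; simp at h
    · rintro ⟨m, _, u, v, huv, hu, _⟩
      exact absurd (List.append_eq_nil_iff.mp huv.symm).1 hu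
  | cons c ls ih =>
    intro p states hinv
    simp only [List.foldl_cons, Option.bind_some]
    rcases hstep : pvStep states (PySem.Chars.lowerChar c) with _ | l
    · rw [pv_run_none]
      simp only [true_iff]
      obtain ⟨m, hm, hsuf⟩ := (pv_step_none p states hinv (PySem.Chars.lowerChar c)).mp hstep
      exact ⟨m, hm, [c], ls, rfl, by simp, by simpa using hsuf⟩
    · have hno : ¬ ∃ m ∈ pvMarkers, m <:+ p ++ [PySem.Chars.lowerChar c] := by
        intro hex
        rw [← pv_step_none p states hinv (PySem.Chars.lowerChar c)] at hex
        rw [hstep] at hex; simp at hex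
      rw [ih (p ++ [PySem.Chars.lowerChar c]) l
        (pv_step_some p states hinv (PySem.Chars.lowerChar c) l hstep)]
      constructor
      · rintro ⟨m, hm, u', v, rfl, hu', hsuf⟩
        exact ⟨m, hm, c :: u', v, rfl, by simp, by simpa using hsuf⟩
      · rintro ⟨m, hm, u, v, huv, hu, hsuf⟩
        rcases u with _ | ⟨c0, u'⟩
        · exact absurd rfl hu
        · simp only [List.cons_append, List.cons.injEq] at huv
          obtain ⟨rfl, rfl⟩ := huv
          rcases u' with _ | ⟨c1, u''⟩
          · exact absurd ⟨m, hm, by simpa using hsuf⟩ hno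
          · exact ⟨m, hm, c1 :: u'', v, rfl, by simp, by simpa using hsuf⟩

theorem pv_infix_iff (m cs : List Char) (hne : m ≠ []) :
    m <:+: cs ↔ ∃ u v, cs = u ++ v ∧ u ≠ [] ∧ m <:+ u := by
  constructor
  · rintro ⟨s, t, rfl⟩
    refine ⟨s ++ m, t, by simp, ?_, ⟨s, rfl⟩⟩
    intro h
    exact hne (List.append_eq_nil_iff.mp h).2
  · rintro ⟨u, v, rfl, _, hsuf⟩
    exact hsuf.isInfix.trans (List.prefix_append u v).isInfix

theorem pv_scan_iff (cs : List Char) :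
    pvScan cs = true ↔ ∃ m ∈ pvMarkers, m <:+: PySem.Chars.lower cs := by
  have hinv : pvInv [] [] := by
    rintro ⟨m, k⟩
    simp only [List.not_mem_nil, false_iff]
    rintro ⟨_, hk1, hklt, hsuf⟩
    have hk1' : 1 ≤ k := hk1
    have hklt' : k < m.length := hklt
    have h0 := List.suffix_nil.mp hsuf
    have h1 : (m.take k).length = 0 := by rw [h0]; rfl
    simp only [List.length_take] at h1
    omega
  unfold pvScan
  rw [Option.isNone_iff_eq_none, pv_main cs [] [] hinv]
  simp only [PySem.Chars.lower]
  constructor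
  · rintro ⟨m, hm, u, v, rfl, hu, hsuf⟩
    have hne : m ≠ [] := by
      have := pv_markers_long m hm
      intro h; rw [h] at this; simp at this
    refine ⟨m, hm, (pv_infix_iff m _ hne).mpr
      ⟨u.map PySem.Chars.lowerChar, v.map PySem.Chars.lowerChar, by simp, ?_, hsuf⟩⟩
    simpa using hu
  · rintro ⟨m, hm, hinf⟩
    have hne : m ≠ [] := by
      have := pv_markers_long m hm
      intro h; rw [h] at this; simp at this
    obtain ⟨u', v', huv, hu', hsuf⟩ := (pv_infix_iff m _ hne).mp hinf
    obtain ⟨u, v, rfl, rfl, rfl⟩ := List.map_eq_append_iff.mp huv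
    exact ⟨m, hm, u, v, rfl, by simpa using hu', hsuf⟩

theorem pv_markers_str :
    ∀ mk ∈ (["missing field", "wrong type", "enum violation",
             "unexpected extra field", "null injection"] : List String),
      mk.toList ∈ pvMarkers := by decide

theorem pv_markers_str' :
    ∀ m ∈ pvMarkers,
      ∃ mk ∈ (["missing field", "wrong type", "enum violation",
               "unexpected extra field", "null injection"] : List String),
        mk.toList = m := by decide

-- ===== VERDICT (by name: the statement is the Claim_ definition above) =====
theorem schema_related_issue_py_spec : Claim_equal_schema_related_issue_py := by
  intro issues _
  unfold Spec_schema_related_issue_py schema_related_issue_py schema_related_issue_py_alt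
  rw [Bool.eq_iff_iff]
  simp only [List.any_eq_true, List.mem_map]
  constructor
  · rintro ⟨i, ⟨j, hj, rfl⟩, mk, hmk, hin⟩
    refine ⟨j, hj, (pv_scan_iff j.toList).mpr ⟨mk.toList, pv_markers_str mk hmk, ?_⟩⟩
    rw [PySem.Str.isIn_iff_infix, PySem.Str.toList_lower] at hin
    exact hin
  · rintro ⟨j, hj, hscan⟩
    obtain ⟨m, hm, hinf⟩ := (pv_scan_iff j.toList).mp hscan
    obtain ⟨mk, hmk, rfl⟩ := pv_markers_str' m hm
    refine ⟨PySem.Str.lower j, ⟨j, hj, rfl⟩, mk, hmk, ?_⟩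
    rw [PySem.Str.isIn_iff_infix, PySem.Str.toList_lower]
    exact hinf
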